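-- pv_equiv track=rewrite | github.com/KVillegasV2300/3IV7_2024_Villegas_Velazquez_Kevin_Fernando | Python/05Arreglos/Matrices.py | transposicion_matriz
-- ===== SOURCE A (Python) =====
-- def transposicion_matriz(matriz1, matriz2, n):
--     matriz_trans =[]
--
--     for j in range(n):
--         fila = []
--         for i in range(n):
--             fila.append(matriz1[i][j] + matriz2[i][j])
--         matriz_trans.append(fila)
--     return matriz_trans
-- ===== SOURCE B (Python) =====
-- def transposicion_matriz(matriz1, matriz2, n):
--     # two passes: elementwise sum matrix, then an idiomatic zip-transpose
--     S = [[matriz1[i][j] + matriz2[i][j] for j in range(n)] for i in range(n)]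
--     return [list(col) for col in zip(*S)]
-- ===== Notes on version B (the rewrite author's own statement) =====
-- stated objective: idiomatic
-- what changed: A fills the transposed result directly with a fused column-major double loop; B first builds the row-major elementwise-sum matrix S with comprehensions and then transposes it in a separate pass with zip(*S).
import Mathlib
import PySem

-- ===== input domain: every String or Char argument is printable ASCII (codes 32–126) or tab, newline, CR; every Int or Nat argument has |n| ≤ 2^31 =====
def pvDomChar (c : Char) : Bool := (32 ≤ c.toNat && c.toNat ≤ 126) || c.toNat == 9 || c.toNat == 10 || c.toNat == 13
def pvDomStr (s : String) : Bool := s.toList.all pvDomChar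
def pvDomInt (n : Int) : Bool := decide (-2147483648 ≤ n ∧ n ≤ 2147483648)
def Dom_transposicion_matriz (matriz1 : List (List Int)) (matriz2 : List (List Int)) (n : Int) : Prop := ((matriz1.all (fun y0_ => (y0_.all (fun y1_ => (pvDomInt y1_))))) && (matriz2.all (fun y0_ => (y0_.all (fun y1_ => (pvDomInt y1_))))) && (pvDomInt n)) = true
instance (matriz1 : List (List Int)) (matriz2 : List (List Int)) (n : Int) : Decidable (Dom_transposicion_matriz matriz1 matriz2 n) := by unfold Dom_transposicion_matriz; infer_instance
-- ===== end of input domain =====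

-- B builds the elementwise-sum matrix row-major in one pass and transposes it with zip(*S) in a
-- second pass, instead of A's fused column-major loop; same O(n^2) cost, more idiomatic decomposition.

-- m[i][j]; the defaults are never reached under Pre_ (Python raises IndexError there)
def pvIdx (m : List (List Int)) (i j : Int) : Int :=
  PySem.List.pyGetD (PySem.List.pyGetD m i []) j 0

-- ===== PORT A =====
def transposicion_matriz (matriz1 : List (List Int)) (matriz2 : List (List Int)) (n : Int) : List (List Int) :=
  (PySem.List.pyRange 0 n 1).foldl (fun matriz_trans j =>
    matriz_trans ++ [(PySem.List.pyRange 0 n 1).foldl (fun fila i =>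
      fila ++ [pvIdx matriz1 i j + pvIdx matriz2 i j]) []]) []

-- ===== PORT B =====
-- zip(*S): take the heads of all rows while every row is nonempty (exact Python zip semantics)
def pvZipStar : List (List Int) → List (List Int)
  | [] => []
  | r :: rs =>
    if h : ((r :: rs).all (fun x => !x.isEmpty)) = true then
      ((r :: rs).map (fun x => x.headD 0)) :: pvZipStar ((r :: rs).map (fun x => x.tail))
    else []
termination_by S => (S.headD []).length
decreasing_by
  simp only [List.all_cons, Bool.and_eq_true, Bool.not_eq_eq_eq_not, Bool.not_true] at h
  cases r with
  | nil => simp at h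
  | cons a t => simp

def transposicion_matriz_alt (matriz1 : List (List Int)) (matriz2 : List (List Int)) (n : Int) : List (List Int) :=
  let S := (PySem.List.pyRange 0 n 1).map (fun i =>
    (PySem.List.pyRange 0 n 1).map (fun j => pvIdx matriz1 i j + pvIdx matriz2 i j))
  pvZipStar S

-- ===== PRECONDITION & SPEC =====
-- Pre_: exactly the inputs where Python A returns (no IndexError): the first n rows of both
-- matrices exist and each has at least n entries.
def Pre_transposicion_matriz (matriz1 : List (List Int)) (matriz2 : List (List Int)) (n : Int) : Prop :=
  n ≤ (matriz1.length : Int) ∧ n ≤ (matriz2.length : Int) ∧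
  (∀ r ∈ matriz1.take n.toNat, n ≤ (r.length : Int)) ∧
  (∀ r ∈ matriz2.take n.toNat, n ≤ (r.length : Int))
instance (matriz1 : List (List Int)) (matriz2 : List (List Int)) (n : Int) : Decidable (Pre_transposicion_matriz matriz1 matriz2 n) := by unfold Pre_transposicion_matriz; infer_instance

def pvWitness_transposicion_matriz : List (List Int) × List (List Int) × Int :=
  ([[1, 2], [3, 4]], [[5, 6], [7, 8]], 2)

def Spec_transposicion_matriz (matriz1 : List (List Int)) (matriz2 : List (List Int)) (n : Int) (out : List (List Int)) : Prop := out = transposicion_matriz_alt matriz1 matriz2 n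
instance (matriz1 : List (List Int)) (matriz2 : List (List Int)) (n : Int) (out : List (List Int)) : Decidable (Spec_transposicion_matriz matriz1 matriz2 n out) := by unfold Spec_transposicion_matriz; infer_instance

-- ===== CLAIM (what is proved, stated in full; the proofs are below) =====
def Claim_equal_transposicion_matriz : Prop := ∀ (matriz1 : List (List Int)) (matriz2 : List (List Int)) (n : Int), Dom_transposicion_matriz matriz1 matriz2 n → Pre_transposicion_matriz matriz1 matriz2 n → Spec_transposicion_matriz matriz1 matriz2 n (transposicion_matriz matriz1 matriz2 n)

-- ===== LEMMAS AND PROOFS =====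

-- zip(*S) of a nonempty matrix whose rows all have length m is the column-indexed matrix
lemma pvZipStar_eq (m : Nat) : ∀ (S : List (List Int)), S ≠ [] → (∀ r ∈ S, r.length = m) →
    pvZipStar S = (List.range m).map (fun j => S.map (fun r => r.getD j 0)) := by
  induction m with
  | zero =>
    intro S _ hlen
    match S with
    | r :: rs =>
      have hr : r = [] := List.eq_nil_of_length_eq_zero (hlen r (by simp))
      subst hr
      rw [pvZipStar]
      simp
  | succ m ih =>
    intro S _ hlen
    match S with
    | r :: rs =>
      have hall : ((r :: rs).all (fun x => !x.isEmpty)) = true := by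
        simp only [List.all_eq_true]
        intro x hx
        have := hlen x hx
        simp
        intro hx0; subst hx0; simp at this
      rw [pvZipStar, dif_pos hall]
      have htail : ∀ r' ∈ (r :: rs).map (fun x => x.tail), r'.length = m := by
        intro r' hr'
        simp only [List.mem_map] at hr'
        obtain ⟨x, hx, rfl⟩ := hr'
        have := hlen x hx
        simp [List.length_tail, this]
      rw [ih ((r :: rs).map (fun x => x.tail)) (by simp) htail]
      rw [List.range_succ_eq_map, List.map_cons]
      congr 1
      · simp [List.head?_eq_getElem?]
      · rw [List.map_map]
        apply List.map_congr_left
        intro j _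
        simp only [Function.comp_def, List.map_map]
        apply List.map_congr_left
        intro x hx
        have hx1 : x.length = m + 1 := hlen x hx
        match x with
        | a :: t => simp
        | [] => simp at hx1

-- zip(*S) of the square row-major matrix over any index list R is the column-major matrix
lemma pvZipStar_square (R : List Int) (F : Int → Int → Int) :
    pvZipStar (R.map (fun i => R.map (fun j => F i j))) =
    R.map (fun j => R.map (fun i => F i j)) := by
  rcases eq_or_ne R [] with hR | hne
  · subst hR; simp [pvZipStar]
  · have hrows : ∀ r ∈ R.map (fun i => R.map (fun j => F i j)), r.length = R.length := by
      intro r hr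
      obtain ⟨i, _, rfl⟩ := List.mem_map.mp hr
      simp
    rw [pvZipStar_eq R.length _ (by simpa using hne) hrows]
    apply List.ext_getElem
    · simp
    · intro j h1 h2
      simp only [List.getElem_map, List.getElem_range, List.map_map]
      apply List.map_congr_left
      intro i _
      simp only [Function.comp_def]
      rw [List.getD_eq_getElem _ _ (by simpa using h2)]
      simp

-- A's fused loop as a map-of-maps over the index range
lemma portA_eq (matriz1 matriz2 : List (List Int)) (n : Int) :
    transposicion_matriz matriz1 matriz2 n =
    (PySem.List.pyRange 0 n 1).map (fun j => (PySem.List.pyRange 0 n 1).map (fun i =>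
      pvIdx matriz1 i j + pvIdx matriz2 i j)) := by
  unfold transposicion_matriz
  simp only [PySem.List.foldl_append_singleton_eq_map, List.nil_append]

theorem transposicion_matriz_spec_aux (matriz1 matriz2 : List (List Int)) (n : Int) :
    transposicion_matriz matriz1 matriz2 n = transposicion_matriz_alt matriz1 matriz2 n := by
  rw [portA_eq]
  unfold transposicion_matriz_alt
  exact (pvZipStar_square (PySem.List.pyRange 0 n 1)
    (fun i j => pvIdx matriz1 i j + pvIdx matriz2 i j)).symm

-- ===== VERDICT (by name: the statement is the Claim_ definition above) =====
theorem transposicion_matriz_spec : Claim_equal_transposicion_matriz := by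
  intro matriz1 matriz2 n _ _
  exact transposicion_matriz_spec_aux matriz1 matriz2 n
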